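-- pv_equiv track=rewrite | github.com/lydiayu26/MIT-Coursework | 6.00/6.0001/1_ps3/document_distance.py | get_most_frequent_words
-- ===== SOURCE A (Python) =====
-- def get_most_frequent_words(dict1, dict2):
--     """
--     Args:
--         dict1: frequency dictionary for one text
--         dict2: frequency dictionary for another text
--     Returns:
--         list of the most frequent word(s) shared between the 2 texts
--
--         The most frequent word is defined as the combined
--         frequency of shared words across both texts.
--         If multiple words share the same highest frequency, return
--         all of them in alphabetical order.
--     """
--     words = []
--     freqs = {}
--
--     for w in dict1:
--         if w in dict2:
--             freqs[w] = dict1[w] + dict2[w]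
--
--     x = 0
--     #finds the word with the highest frequency in freqs
--     for f in freqs:
--         if freqs[f] >= x:
--             x = freqs[f]
--
--     #adds all words with the highest frequency to words
--     for i in freqs:
--         if freqs[i] == x:
--             words.append(i)
--
--     words.sort()
--     return words
-- ===== SOURCE B (Python) =====
-- def get_most_frequent_words(dict1, dict2):
--     # One fused pass over dict1: keep a running best combined frequency and the
--     # list of shared words attaining it; no intermediate freqs dict, no rescans.
--     best = 0
--     words = []
--     for w in dict1:
--         if w in dict2:
--             v = dict1[w] + dict2[w]
--             if v > best:
--                 best = v
--                 words = [w]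
--             elif v == best:
--                 words.append(w)
--     words.sort()
--     return words
-- ===== Notes on version B (the rewrite author's own statement) =====
-- stated objective: simpler
-- what changed: Replaces A's three phases (build a freqs dict of shared words, rescan it for the maximum, rescan again to collect words with that maximum) by one fused pass that keeps a running best frequency and the list of words attaining it, then sorts.
import Mathlib
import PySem

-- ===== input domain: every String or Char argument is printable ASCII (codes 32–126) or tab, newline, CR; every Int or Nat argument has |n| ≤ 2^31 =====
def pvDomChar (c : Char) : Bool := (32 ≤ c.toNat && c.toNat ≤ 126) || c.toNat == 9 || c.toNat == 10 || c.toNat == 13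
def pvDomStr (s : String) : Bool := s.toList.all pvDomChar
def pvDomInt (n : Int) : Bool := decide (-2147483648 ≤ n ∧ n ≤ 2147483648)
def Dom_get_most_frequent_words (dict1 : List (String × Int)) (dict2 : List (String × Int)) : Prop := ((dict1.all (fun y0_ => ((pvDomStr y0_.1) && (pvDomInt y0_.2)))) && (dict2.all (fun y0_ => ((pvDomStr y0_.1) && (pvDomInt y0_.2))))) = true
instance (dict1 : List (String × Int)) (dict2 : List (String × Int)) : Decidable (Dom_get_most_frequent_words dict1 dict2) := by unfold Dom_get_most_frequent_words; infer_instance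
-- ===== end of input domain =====

-- B replaces A's three phases (build a freqs dict, rescan for the max, rescan to collect) by one
-- fused pass keeping a running best frequency and the words attaining it; objective: simpler.

-- ===== PORT A =====
def get_most_frequent_words (dict1 : List (String × Int)) (dict2 : List (String × Int)) : List String :=
  let d1 := PySem.Dict.ofList dict1
  let d2 := PySem.Dict.ofList dict2
  -- words = [] ; freqs = {} ; for w in dict1: if w in dict2: freqs[w] = dict1[w] + dict2[w]
  let freqs := d1.keys.foldl
    (fun fr w => if d2.contains w then fr.insert w (d1.getD w 0 + d2.getD w 0) else fr)
    (PySem.Dict.empty : PySem.Dict String Int)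
  -- x = 0 ; for f in freqs: if freqs[f] >= x: x = freqs[f]
  let x := freqs.keys.foldl (fun x fk => if freqs.getD fk 0 ≥ x then freqs.getD fk 0 else x) 0
  -- for i in freqs: if freqs[i] == x: words.append(i)
  let words := freqs.keys.foldl (fun ws i => if freqs.getD i 0 = x then ws ++ [i] else ws) ([] : List String)
  -- words.sort() ; return words
  PySem.List.sorted words (fun s => s) false

-- ===== PORT B =====
def get_most_frequent_words_alt (dict1 : List (String × Int)) (dict2 : List (String × Int)) : List String :=
  let d1 := PySem.Dict.ofList dict1
  let d2 := PySem.Dict.ofList dict2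
  -- best = 0 ; words = [] ; one fused pass over dict1
  let st := d1.keys.foldl
    (fun st w =>
      if d2.contains w then
        let v := d1.getD w 0 + d2.getD w 0
        if v > st.1 then (v, [w])
        else if v = st.1 then (st.1, st.2 ++ [w])
        else st
      else st)
    ((0 : Int), ([] : List String))
  -- words.sort() ; return words
  PySem.List.sorted st.2 (fun s => s) false

-- ===== PRECONDITION & SPEC =====
def Spec_get_most_frequent_words (dict1 : List (String × Int)) (dict2 : List (String × Int)) (out : List String) : Prop := out = get_most_frequent_words_alt dict1 dict2
instance (dict1 : List (String × Int)) (dict2 : List (String × Int)) (out : List String) : Decidable (Spec_get_most_frequent_words dict1 dict2 out) := by unfold Spec_get_most_frequent_words; infer_instance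

-- ===== CLAIM (what is proved, stated in full; the proofs are below) =====
def Claim_equal_get_most_frequent_words : Prop := ∀ (dict1 : List (String × Int)) (dict2 : List (String × Int)), Dom_get_most_frequent_words dict1 dict2 → Spec_get_most_frequent_words dict1 dict2 (get_most_frequent_words dict1 dict2)

-- ===== LEMMAS AND PROOFS =====

-- Abbreviations for the two loop pipelines, over an arbitrary key list / membership test / frequency
-- function; the ports are definitionally these at ks = d1.keys, p = d2.contains, f = combined freq.
def pvFreqs (ks : List String) (p : String → Bool) (f : String → Int) : PySem.Dict String Int :=
  ks.foldl (fun fr w => if p w then fr.insert w (f w) else fr) PySem.Dict.empty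

def pvX (ks : List String) (p : String → Bool) (f : String → Int) : Int :=
  (pvFreqs ks p f).keys.foldl
    (fun x fk => if (pvFreqs ks p f).getD fk 0 ≥ x then (pvFreqs ks p f).getD fk 0 else x) 0

def pvA (ks : List String) (p : String → Bool) (f : String → Int) : List String :=
  PySem.List.sorted
    ((pvFreqs ks p f).keys.foldl
      (fun ws i => if (pvFreqs ks p f).getD i 0 = pvX ks p f then ws ++ [i] else ws) [])
    (fun s => s) false

def pvB (ks : List String) (p : String → Bool) (f : String → Int) : List String :=
  PySem.List.sorted
    ((ks.foldl
        (fun st w =>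
          if p w then
            if f w > st.1 then (f w, [w])
            else if f w = st.1 then (st.1, st.2 ++ [w])
            else st
          else st)
        ((0 : Int), ([] : List String))).2)
    (fun s => s) false

-- A's running-max fold only grows past its initial value.
theorem pvMaxFold_ge_init (f : String → Int) : ∀ (S : List String) (x : Int),
    x ≤ S.foldl (fun x w => if f w ≥ x then f w else x) x := by
  intro S
  induction S with
  | nil => intro x; simp
  | cons a t ih =>
      intro x
      have h1 : x ≤ (if f a ≥ x then f a else x) := by split_ifs with h <;> omega
      calc x ≤ (if f a ≥ x then f a else x) := h1
        _ ≤ t.foldl (fun x w => if f w ≥ x then f w else x) (if f a ≥ x then f a else x) := ih _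

-- Every value seen by A's running-max fold is bounded by its result.
theorem pvMaxFold_mem_le (f : String → Int) : ∀ (S : List String) (x : Int), ∀ w ∈ S,
    f w ≤ S.foldl (fun x w => if f w ≥ x then f w else x) x := by
  intro S
  induction S with
  | nil => intro x w hw; simp at hw
  | cons a t ih =>
      intro x w hw
      rcases List.mem_cons.mp hw with h | h
      · subst h
        have h1 : f w ≤ (if f w ≥ x then f w else x) := by split_ifs with h <;> omega
        calc f w ≤ (if f w ≥ x then f w else x) := h1
          _ ≤ t.foldl (fun x u => if f u ≥ x then f u else x) (if f w ≥ x then f w else x) :=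
            pvMaxFold_ge_init f t _
      · exact ih _ w h

-- B's fused pass over the shared words computes exactly (A's max, the words attaining it).
theorem pvPairFold (f : String → Int) (S : List String) :
    S.foldl (fun st w =>
        if f w > st.1 then (f w, [w])
        else if f w = st.1 then (st.1, st.2 ++ [w])
        else st) ((0 : Int), ([] : List String))
    = (S.foldl (fun x w => if f w ≥ x then f w else x) 0,
       S.filter (fun w => decide (f w = S.foldl (fun x w => if f w ≥ x then f w else x) 0))) := by
  induction S using List.reverseRecOn with
  | nil => simp
  | append_singleton S w ih =>
      have hM : (S ++ [w]).foldl (fun x w => if f w ≥ x then f w else x) 0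
          = (if f w ≥ S.foldl (fun x w => if f w ≥ x then f w else x) 0
             then f w else S.foldl (fun x w => if f w ≥ x then f w else x) 0) := by
        simp [List.foldl_append]
      set M := S.foldl (fun x w => if f w ≥ x then f w else x) 0 with hMdef
      rcases lt_trichotomy M (f w) with h | h | h
      · have hnew : (S ++ [w]).foldl (fun x w => if f w ≥ x then f w else x) 0 = f w := by
          rw [hM]; split_ifs with hh <;> omega
        have hfilt : S.filter (fun u => decide (f u = f w)) = [] := by
          apply List.filter_eq_nil_iff.mpr
          intro u hu
          have := pvMaxFold_mem_le f S 0 u hu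
          simp only [decide_eq_true_eq]
          omega
        rw [List.foldl_append, ih, hnew]
        simp [h, hfilt]
      · have hnew : (S ++ [w]).foldl (fun x w => if f w ≥ x then f w else x) 0 = M := by
          rw [hM]; split_ifs with hh <;> omega
        rw [List.foldl_append, ih, hnew]
        simp [h, List.filter_append]
      · have hnew : (S ++ [w]).foldl (fun x w => if f w ≥ x then f w else x) 0 = M := by
          rw [hM]; split_ifs with hh <;> omega
        rw [List.foldl_append, ih, hnew]
        have h1 : ¬ f w > M := by omega
        have h2 : ¬ f w = M := by omega
        simp [h1, h2, List.filter_append]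

-- The two pipelines agree for any duplicate-free key list.
theorem pvAB (ks : List String) (p : String → Bool) (f : String → Int) (hnd : ks.Nodup) :
    pvA ks p f = pvB ks p f := by
  set S : List String := ks.filter p with hS
  have hSnd : S.Nodup := hnd.filter _
  have hfreqs : (pvFreqs ks p f).items = S.map (fun w => (w, f w)) := by
    unfold pvFreqs
    rw [← List.foldl_filter]
    rw [PySem.Dict.items_foldl_insert_fresh S (fun w => w) f PySem.Dict.empty
      (by intro a _; simp [PySem.Dict.contains_empty]) (by simpa using hSnd)]
    simp [hS, show (PySem.Dict.empty : PySem.Dict String Int).items = [] from rfl]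
  have hkeys : (pvFreqs ks p f).keys = S := by
    show (pvFreqs ks p f).items.map Prod.fst = S
    rw [hfreqs]; simp [Function.comp_def]
  have hkeysnd : (pvFreqs ks p f).keys.Nodup := by rw [hkeys]; exact hSnd
  have hget : ∀ w ∈ S, (pvFreqs ks p f).getD w 0 = f w := by
    intro w hw
    exact PySem.Dict.getD_of_mem_items (pvFreqs ks p f)
      (by rw [hfreqs]; exact List.mem_map_of_mem hw) hkeysnd 0
  have hx : pvX ks p f = S.foldl (fun x w => if f w ≥ x then f w else x) 0 := by
    unfold pvX
    rw [hkeys]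
    exact PySem.List.foldl_congr_mem S _ _ 0 (by intro acc w hw; rw [hget w hw])
  set M := S.foldl (fun x w => if f w ≥ x then f w else x) 0 with hMdef
  unfold pvA pvB
  rw [hkeys, hx]
  rw [PySem.List.foldl_congr_mem S _
    (fun ws i => if f i = M then ws ++ [i] else ws) []
    (by intro acc w hw; rw [hget w hw])]
  have hA : S.foldl (fun ws i => if f i = M then ws ++ [i] else ws) []
      = S.filter (fun w => decide (f w = M)) := by
    have := PySem.List.foldl_append_if (fun i => decide (f i = M)) (fun i => i) S []
    simpa using this
  rw [hA, ← List.foldl_filter, ← hS, pvPairFold f S]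

-- ===== VERDICT (by name: the statement is the Claim_ definition above) =====
theorem get_most_frequent_words_spec : Claim_equal_get_most_frequent_words := by
  intro dict1 dict2 _
  exact pvAB (PySem.Dict.ofList dict1).keys
    (fun w => (PySem.Dict.ofList dict2).contains w)
    (fun w => (PySem.Dict.ofList dict1).getD w 0 + (PySem.Dict.ofList dict2).getD w 0)
    (PySem.Dict.nodup_keys_ofList dict1)
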